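-- pv_equiv track=rewrite | github.com/WhalerMike/uiao | src/uiao/adapters/terraform_parser.py | _compare_maps
-- ===== SOURCE A (Python) =====
-- from typing import Any, Dict, List, Optional, Tuple
--
-- def _compare_maps(
--     left: Dict[Tuple[str, str], dict],
--     right: Dict[Tuple[str, str], dict],
--     left_label: str,
--     right_label: str,
-- ) -> dict:
--     """Compare two resource maps and produce a diff summary."""
--     left_keys = set(left.keys())
--     right_keys = set(right.keys())
--
--     added = sorted(f"{t}.{n}" for t, n in (right_keys - left_keys))
--     removed = sorted(f"{t}.{n}" for t, n in (left_keys - right_keys))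
--
--     changed: List[str] = []
--     consistent: List[str] = []
--     for key in sorted(left_keys & right_keys):
--         left_attrs = left[key].get("attributes", {})
--         right_attrs = right[key].get("attributes", {})
--         addr = f"{key[0]}.{key[1]}"
--         if left_attrs != right_attrs:
--             changed.append(addr)
--         else:
--             consistent.append(addr)
--
--     return {
--         "added": added,
--         "removed": removed,
--         "changed": changed,
--         "consistent": consistent,
--     }
-- ===== SOURCE B (Python) =====
-- def _compare_maps(left, right, left_label, right_label):
--     """Single pass over the sorted union of keys, classifying each address."""
--     added, removed, changed, consistent = [], [], [], []
--     for key in sorted(left.keys() | right.keys()):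
--         addr = f"{key[0]}.{key[1]}"
--         if key not in left:
--             added.append(addr)
--         elif key not in right:
--             removed.append(addr)
--         elif left[key].get("attributes", {}) == right[key].get("attributes", {}):
--             consistent.append(addr)
--         else:
--             changed.append(addr)
--     added.sort()    # addresses are ordered as strings, like sorted() of strings
--     removed.sort()
--     return {"added": added, "removed": removed, "changed": changed, "consistent": consistent}
-- ===== Notes on version B (the rewrite author's own statement) =====
-- stated objective: simpler
-- what changed: Replaces the three set-algebra passes (right-left, left-right, intersection loop) by one pass over the sorted union of keys that classifies each key into added/removed/changed/consistent, sorting added/removed as strings at the end to keep A's two distinct sort orders.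
import Mathlib
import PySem

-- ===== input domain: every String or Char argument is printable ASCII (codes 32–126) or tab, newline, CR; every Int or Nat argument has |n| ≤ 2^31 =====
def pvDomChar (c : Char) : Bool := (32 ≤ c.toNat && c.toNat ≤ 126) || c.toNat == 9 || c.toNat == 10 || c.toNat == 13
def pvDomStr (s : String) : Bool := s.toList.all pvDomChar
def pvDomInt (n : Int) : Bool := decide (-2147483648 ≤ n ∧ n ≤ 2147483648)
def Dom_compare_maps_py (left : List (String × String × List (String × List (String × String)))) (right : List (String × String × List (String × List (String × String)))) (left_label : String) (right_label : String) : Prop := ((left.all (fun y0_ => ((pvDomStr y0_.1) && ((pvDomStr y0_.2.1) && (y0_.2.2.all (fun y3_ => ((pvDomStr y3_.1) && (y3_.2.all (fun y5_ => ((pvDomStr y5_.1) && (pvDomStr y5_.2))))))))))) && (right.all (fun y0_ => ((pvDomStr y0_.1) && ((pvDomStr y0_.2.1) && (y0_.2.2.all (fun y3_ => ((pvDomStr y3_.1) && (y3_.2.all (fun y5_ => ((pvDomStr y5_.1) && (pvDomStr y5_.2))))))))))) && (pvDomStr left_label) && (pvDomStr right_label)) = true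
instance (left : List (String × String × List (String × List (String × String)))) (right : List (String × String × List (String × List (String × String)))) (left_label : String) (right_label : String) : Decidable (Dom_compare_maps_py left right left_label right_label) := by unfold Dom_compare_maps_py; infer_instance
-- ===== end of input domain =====

-- ===== PORT A =====
-- B differs from A only in decomposition: one classifying pass over the sorted union of keys
-- instead of three set-algebra passes; return values proved equal on the whole domain.
-- Shared marshalling/Python-semantics helpers (Python dicts arrive as assoc lists: dict()
-- keeps the first position and the last value of a duplicated key = PySem.Dict.ofList):
def pvAddr (k : String × String) : String := k.1 ++ "." ++ k.2
def pvNormRes (r : List (String × List (String × String))) : PySem.Dict String (PySem.Dict String String) :=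
  PySem.Dict.ofList (r.map (fun kv => (kv.1, PySem.Dict.ofList kv.2)))
def pvNormMap (m : List (String × String × List (String × List (String × String)))) :
    PySem.Dict (String × String) (PySem.Dict String (PySem.Dict String String)) :=
  PySem.Dict.ofList (m.map (fun e => ((e.1, e.2.1), pvNormRes e.2.2)))
-- Python's dict == ignores insertion order: same key set, same values (exact: keys are unique).
def pvDictEq (a b : PySem.Dict String String) : Bool :=
  a.size == b.size && a.items.all (fun kv => b.get? kv.1 == some kv.2)
-- left[key].get("attributes", {}): key is always present where this is used, so getD is exact.
def pvAttrs (d : PySem.Dict String (PySem.Dict String String)) : PySem.Dict String String :=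
  PySem.Dict.getD d "attributes" PySem.Dict.empty
def pvEq (ld rd : PySem.Dict (String × String) (PySem.Dict String (PySem.Dict String String)))
    (k : String × String) : Bool :=
  pvDictEq (pvAttrs (PySem.Dict.getD ld k PySem.Dict.empty)) (pvAttrs (PySem.Dict.getD rd k PySem.Dict.empty))
-- the body of A's for-loop over sorted(left_keys & right_keys)
def pvStepA (ld rd : PySem.Dict (String × String) (PySem.Dict String (PySem.Dict String String)))
    (acc : List String × List String) (key : String × String) : List String × List String :=
  if !(pvEq ld rd key) then (acc.1 ++ [pvAddr key], acc.2) else (acc.1, acc.2 ++ [pvAddr key])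

def compare_maps_py (left : List (String × String × List (String × List (String × String)))) (right : List (String × String × List (String × List (String × String)))) (left_label : String) (right_label : String) : List (String × List String) :=
  let ld := pvNormMap left
  let rd := pvNormMap right
  let left_keys := PySem.Set.ofList ld.keys
  let right_keys := PySem.Set.ofList rd.keys
  -- sorted(f"{t}.{n}" …) sorts strings; sorted(left_keys & right_keys) sorts tuples (toLex = Python tuple order)
  let added := PySem.List.sorted ((right_keys.diff left_keys).map pvAddr) (fun s => s)
  let removed := PySem.List.sorted ((left_keys.diff right_keys).map pvAddr) (fun s => s)
  let cc := (PySem.List.sorted (left_keys.inter right_keys) (fun k => toLex k)).foldl (pvStepA ld rd) ([], [])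
  [("added", added), ("removed", removed), ("changed", cc.1), ("consistent", cc.2)]

-- ===== PORT B =====
-- the body of B's single classifying for-loop (added, removed, changed, consistent)
def pvStepB (ld rd : PySem.Dict (String × String) (PySem.Dict String (PySem.Dict String String)))
    (acc : List String × List String × List String × List String) (key : String × String) :
    List String × List String × List String × List String :=
  let addr := pvAddr key
  if !(ld.contains key) then (acc.1 ++ [addr], acc.2.1, acc.2.2.1, acc.2.2.2)
  else if !(rd.contains key) then (acc.1, acc.2.1 ++ [addr], acc.2.2.1, acc.2.2.2)
  else if pvEq ld rd key then (acc.1, acc.2.1, acc.2.2.1, acc.2.2.2 ++ [addr])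
  else (acc.1, acc.2.1, acc.2.2.1 ++ [addr], acc.2.2.2)

def compare_maps_py_alt (left : List (String × String × List (String × List (String × String)))) (right : List (String × String × List (String × List (String × String)))) (left_label : String) (right_label : String) : List (String × List String) :=
  let ld := pvNormMap left
  let rd := pvNormMap right
  let r := (PySem.List.sorted ((PySem.Set.ofList ld.keys).union (PySem.Set.ofList rd.keys)) (fun k => toLex k)).foldl (pvStepB ld rd) ([], [], [], [])
  [("added", PySem.List.sorted r.1 (fun s => s)), ("removed", PySem.List.sorted r.2.1 (fun s => s)),
   ("changed", r.2.2.1), ("consistent", r.2.2.2)]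

-- ===== PRECONDITION & SPEC =====
def Spec_compare_maps_py (left : List (String × String × List (String × List (String × String)))) (right : List (String × String × List (String × List (String × String)))) (left_label : String) (right_label : String) (out : List (String × List String)) : Prop := out = compare_maps_py_alt left right left_label right_label
instance (left : List (String × String × List (String × List (String × String)))) (right : List (String × String × List (String × List (String × String)))) (left_label : String) (right_label : String) (out : List (String × List String)) : Decidable (Spec_compare_maps_py left right left_label right_label out) := by unfold Spec_compare_maps_py; infer_instance

-- ===== CLAIM (what is proved, stated in full; the proofs are below) =====
def Claim_equal_compare_maps_py : Prop := ∀ (left : List (String × String × List (String × List (String × String)))) (right : List (String × String × List (String × List (String × String)))) (left_label : String) (right_label : String), Dom_compare_maps_py left right left_label right_label → Spec_compare_maps_py left right left_label right_label (compare_maps_py left right left_label right_label)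

-- ===== LEMMAS AND PROOFS =====

-- the pair fold of A's loop produces the two filtered, formatted lists
theorem pvFoldA (ld rd : PySem.Dict (String × String) (PySem.Dict String (PySem.Dict String String)))
    (xs : List (String × String)) (a b : List String) :
    xs.foldl (pvStepA ld rd) (a, b) =
      (a ++ (xs.filter (fun k => !(pvEq ld rd k))).map pvAddr,
       b ++ (xs.filter (fun k => pvEq ld rd k)).map pvAddr) := by
  induction xs generalizing a b with
  | nil => simp
  | cons x xs ih =>
    rw [List.foldl_cons]
    cases he : pvEq ld rd x with
    | false =>
      have hs : pvStepA ld rd (a, b) x = (a ++ [pvAddr x], b) := by simp [pvStepA, he]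
      rw [hs, ih]; simp [List.filter_cons, he]
    | true =>
      have hs : pvStepA ld rd (a, b) x = (a, b ++ [pvAddr x]) := by simp [pvStepA, he]
      rw [hs, ih]; simp [List.filter_cons, he]

-- the quadruple fold of B's loop produces the four filtered, formatted lists
theorem pvFoldB (ld rd : PySem.Dict (String × String) (PySem.Dict String (PySem.Dict String String)))
    (xs : List (String × String)) (a b c d : List String) :
    xs.foldl (pvStepB ld rd) (a, b, c, d) =
      (a ++ (xs.filter (fun k => !(ld.contains k))).map pvAddr,
       b ++ (xs.filter (fun k => ld.contains k && !(rd.contains k))).map pvAddr,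
       c ++ (xs.filter (fun k => ld.contains k && rd.contains k && !(pvEq ld rd k))).map pvAddr,
       d ++ (xs.filter (fun k => ld.contains k && rd.contains k && pvEq ld rd k)).map pvAddr) := by
  induction xs generalizing a b c d with
  | nil => simp
  | cons x xs ih =>
    rw [List.foldl_cons]
    cases hl : ld.contains x with
    | false =>
      have hs : pvStepB ld rd (a, b, c, d) x = (a ++ [pvAddr x], b, c, d) := by simp [pvStepB, hl]
      rw [hs, ih]; simp [List.filter_cons, hl]
    | true =>
      cases hr : rd.contains x with
      | false =>
        have hs : pvStepB ld rd (a, b, c, d) x = (a, b ++ [pvAddr x], c, d) := by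
          simp [pvStepB, hl, hr]
        rw [hs, ih]; simp [List.filter_cons, hl, hr]
      | true =>
        cases he : pvEq ld rd x with
        | false =>
          have hs : pvStepB ld rd (a, b, c, d) x = (a, b, c ++ [pvAddr x], d) := by
            simp [pvStepB, hl, hr, he]
          rw [hs, ih]; simp [List.filter_cons, hl, hr, he]
        | true =>
          have hs : pvStepB ld rd (a, b, c, d) x = (a, b, c, d ++ [pvAddr x]) := by
            simp [pvStepB, hl, hr, he]
          rw [hs, ih]; simp [List.filter_cons, hl, hr, he]

-- sorting-by-value of permuted string lists gives the same list
theorem pvSortedIdCongr (as bs : List String) (h : as.Perm bs) :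
    PySem.List.sorted as (fun s => s) = PySem.List.sorted bs (fun s => s) := by
  apply PySem.List.sorted_id_eq_of_perm_of_pairwise
  · exact (PySem.List.sorted_perm bs (fun s => s) false).trans h.symm
  · exact PySem.List.sorted_pairwise bs (fun s => s)

-- a duplicate-free list sorted by Python tuple order is strictly increasing
theorem pvPairwiseLtSorted (xs : List (String × String)) (h : xs.Nodup) :
    (PySem.List.sorted xs (fun k => toLex k)).Pairwise (fun a b => toLex a < toLex b) := by
  have hperm := PySem.List.sorted_perm xs (fun k => toLex k) false
  have hle := PySem.List.sorted_pairwise xs (fun k => toLex k)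
  have hnd : (PySem.List.sorted xs (fun k => toLex k)).Nodup := hperm.nodup_iff.mpr h
  exact (hle.and hnd).imp (fun hab =>
    lt_of_le_of_ne hab.1 (fun hc => hab.2 (toLex.injective hc)))

-- two strictly increasing (w.r.t. tuple order) permutations of each other coincide
theorem pvStrictCongr (as bs : List (String × String)) (h : as.Perm bs)
    (ha : as.Pairwise (fun a b => toLex a < toLex b))
    (hb : bs.Pairwise (fun a b => toLex a < toLex b)) : as = bs := by
  have h1 := PySem.List.sorted_eq_of_perm_of_pairwise_lt bs as (fun k => toLex k) h ha
  have h2 := PySem.List.sorted_eq_of_perm_of_pairwise_lt bs bs (fun k => toLex k) (List.Perm.refl bs) hb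
  rw [← h1, h2]

-- ===== VERDICT (by name: the statement is the Claim_ definition above) =====
theorem compare_maps_py_spec : Claim_equal_compare_maps_py := by
  intro left right left_label right_label _
  unfold Spec_compare_maps_py
  simp only [compare_maps_py, compare_maps_py_alt]
  rw [pvFoldA, pvFoldB]
  set ld := pvNormMap left with hld
  set rd := pvNormMap right with hrd
  have hkl : ld.keys.Nodup := by rw [hld]; unfold pvNormMap; exact PySem.Dict.nodup_keys_ofList _
  have hkr : rd.keys.Nodup := by rw [hrd]; unfold pvNormMap; exact PySem.Dict.nodup_keys_ofList _
  set S := PySem.List.sorted ((PySem.Set.ofList ld.keys).union (PySem.Set.ofList rd.keys)) (fun k => toLex k) with hS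
  have hndS : S.Nodup := by
    rw [hS]
    exact (PySem.List.sorted_perm _ _ _).nodup_iff.mpr
      (PySem.Set.nodup_union _ _ (PySem.Set.nodup_ofList _))
  have hmemS : ∀ k : String × String, k ∈ S ↔ k ∈ ld.keys ∨ k ∈ rd.keys := by
    intro k
    rw [hS, PySem.List.mem_sorted, PySem.Set.mem_union, PySem.Set.mem_ofList, PySem.Set.mem_ofList]
  set C := PySem.List.sorted ((PySem.Set.ofList ld.keys).inter (PySem.Set.ofList rd.keys)) (fun k => toLex k) with hC
  have hndC : C.Nodup := by
    rw [hC]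
    exact (PySem.List.sorted_perm _ _ _).nodup_iff.mpr
      (PySem.Set.nodup_inter _ _ (PySem.Set.nodup_ofList _))
  have hmemC : ∀ k : String × String, k ∈ C ↔ k ∈ ld.keys ∧ k ∈ rd.keys := by
    intro k
    rw [hC, PySem.List.mem_sorted, PySem.Set.mem_inter, PySem.Set.mem_ofList, PySem.Set.mem_ofList]
  have hadd : PySem.List.sorted (((PySem.Set.ofList rd.keys).diff (PySem.Set.ofList ld.keys)).map pvAddr) (fun s => s)
      = PySem.List.sorted ((S.filter (fun k => !(ld.contains k))).map pvAddr) (fun s => s) := by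
    apply pvSortedIdCongr
    apply List.Perm.map
    rw [List.perm_ext_iff_of_nodup (PySem.Set.nodup_diff _ _ (PySem.Set.nodup_ofList _)) (hndS.filter _)]
    intro a
    simp only [PySem.Set.mem_diff, PySem.Set.mem_ofList, List.mem_filter, hmemS,
      PySem.Dict.contains_eq_decide_mem_keys, Bool.not_eq_true', decide_eq_false_iff_not]
    tauto
  have hrem : PySem.List.sorted (((PySem.Set.ofList ld.keys).diff (PySem.Set.ofList rd.keys)).map pvAddr) (fun s => s)
      = PySem.List.sorted ((S.filter (fun k => ld.contains k && !(rd.contains k))).map pvAddr) (fun s => s) := by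
    apply pvSortedIdCongr
    apply List.Perm.map
    rw [List.perm_ext_iff_of_nodup (PySem.Set.nodup_diff _ _ (PySem.Set.nodup_ofList _)) (hndS.filter _)]
    intro a
    simp only [PySem.Set.mem_diff, PySem.Set.mem_ofList, List.mem_filter, hmemS,
      PySem.Dict.contains_eq_decide_mem_keys, Bool.and_eq_true, Bool.not_eq_true',
      decide_eq_true_eq, decide_eq_false_iff_not]
    tauto
  have hchg : (C.filter (fun k => !(pvEq ld rd k))).map pvAddr
      = (S.filter (fun k => ld.contains k && rd.contains k && !(pvEq ld rd k))).map pvAddr := by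
    apply congrArg (List.map pvAddr)
    apply pvStrictCongr
    · rw [List.perm_ext_iff_of_nodup (hndC.filter _) (hndS.filter _)]
      intro a
      simp only [List.mem_filter, hmemC, hmemS, PySem.Dict.contains_eq_decide_mem_keys,
        Bool.and_eq_true, Bool.not_eq_true', decide_eq_true_eq]
      tauto
    · exact List.Pairwise.sublist List.filter_sublist (by rw [hC]; exact pvPairwiseLtSorted _ (PySem.Set.nodup_inter _ _ (PySem.Set.nodup_ofList _)))
    · exact List.Pairwise.sublist List.filter_sublist (by rw [hS]; exact pvPairwiseLtSorted _ (PySem.Set.nodup_union _ _ (PySem.Set.nodup_ofList _)))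
  have hcon : (C.filter (fun k => pvEq ld rd k)).map pvAddr
      = (S.filter (fun k => ld.contains k && rd.contains k && pvEq ld rd k)).map pvAddr := by
    apply congrArg (List.map pvAddr)
    apply pvStrictCongr
    · rw [List.perm_ext_iff_of_nodup (hndC.filter _) (hndS.filter _)]
      intro a
      simp only [List.mem_filter, hmemC, hmemS, PySem.Dict.contains_eq_decide_mem_keys,
        Bool.and_eq_true, decide_eq_true_eq]
      tauto
    · exact List.Pairwise.sublist List.filter_sublist (by rw [hC]; exact pvPairwiseLtSorted _ (PySem.Set.nodup_inter _ _ (PySem.Set.nodup_ofList _)))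
    · exact List.Pairwise.sublist List.filter_sublist (by rw [hS]; exact pvPairwiseLtSorted _ (PySem.Set.nodup_union _ _ (PySem.Set.nodup_ofList _)))
  simp [hadd, hrem, hchg, hcon]
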